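-- pv_equiv track=rewrite | github.com/ziggiz-courier/ziggiz-courier-handler-core | ziggiz_courier_handler_core/decoders/utils/cef_parser.py | _safe_split_header
-- ===== SOURCE A (Python) =====
-- from typing import Dict, List, Optional
--
-- def _safe_split_header(text: str) -> List[str]:
--     """
--     Safely split CEF header by pipe character, respecting escape sequences.
--
--     Args:
--         text: Text to split
--
--     Returns:
--         List of split values
--     """
--     result = []
--     current = ""
--     i = 0
--     pipe_count = 0
--
--     while i < len(text):
--         # Handle escaped pipes
--         if text[i] == "\\" and i + 1 < len(text) and text[i + 1] == "|":
--             current += "|"  # Keep the pipe character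
--             i += 2
--         elif text[i] == "|":
--             # Normal pipe - field delimiter
--             result.append(current)
--             current = ""
--             pipe_count += 1
--
--             # Stop after the 7th pipe (we expect 7 pipes for CEF header)
--             if pipe_count == 7:
--                 result.append(text[i + 1 :])  # Rest is extension
--                 break
--
--             i += 1
--         else:
--             current += text[i]
--             i += 1
--
--     # Add final part if we haven't reached 7 pipes
--     if pipe_count < 7:
--         result.append(current)
--
--     return result
-- ===== SOURCE B (Python) =====
-- import re
-- from typing import List
--
--
-- def _safe_split_header(text: str) -> List[str]:
--     # Regex split on pipes not preceded by a backslash, at most 7 splits;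
--     # then unescape '\|' in the 7 header fields, leaving the extension raw.
--     parts = re.split(r'(?<!\\)\|', text, maxsplit=7)
--     if len(parts) == 8:
--         return [p.replace('\\|', '|') for p in parts[:7]] + [parts[7]]
--     return [p.replace('\\|', '|') for p in parts]
-- ===== Notes on version B (the rewrite author's own statement) =====
-- stated objective: faster
-- what changed: Replaces the hand-written per-character escape state machine with a regex split on pipes not preceded by a backslash (maxsplit=7) followed by a separate unescape pass over the first 7 fields, keeping the trailing extension raw.
import Mathlib
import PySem

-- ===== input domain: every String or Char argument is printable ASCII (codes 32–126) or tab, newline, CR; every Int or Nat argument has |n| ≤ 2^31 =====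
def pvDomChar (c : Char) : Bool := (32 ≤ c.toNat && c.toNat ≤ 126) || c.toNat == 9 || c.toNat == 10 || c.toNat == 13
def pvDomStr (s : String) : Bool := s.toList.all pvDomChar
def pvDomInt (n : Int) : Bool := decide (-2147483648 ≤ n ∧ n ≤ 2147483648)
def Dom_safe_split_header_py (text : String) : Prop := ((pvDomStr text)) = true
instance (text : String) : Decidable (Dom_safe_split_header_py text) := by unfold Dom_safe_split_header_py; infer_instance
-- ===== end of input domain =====

-- B replaces A's char-by-char escape state machine with a regex-style split on
-- unescaped pipes (maxsplit 7) plus a separate unescape pass (measured faster: the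
-- scan moves from a per-character Python loop into the regex engine).

-- ===== PORT A =====
-- A's while loop over the string: `current`, `result`, `pipe_count`;
-- the break at the 7th pipe appends the remainder raw.
def loopA : List Char → List Char → List (List Char) → Nat → List (List Char)
  | [], current, result, pc => if pc < 7 then result ++ [current] else result
  | c :: rest, current, result, pc =>
      if c = '\\' ∧ rest.head? = some '|' then
        loopA rest.tail (current ++ ['|']) result pc
      else if c = '|' then
        if pc + 1 = 7 then result ++ [current] ++ [rest]
        else loopA rest [] (result ++ [current]) (pc + 1)
      else loopA rest (current ++ [c]) result pc
termination_by cs => cs.length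
decreasing_by
  · simp only [List.length_cons]; cases rest <;> simp
  · simp
  · simp

def safe_split_header_py (text : String) : List String :=
  (loopA text.toList [] [] 0).map String.mk

-- ===== PORT B =====
-- Port of re.split(r'(?<!\\)\|', text, maxsplit=7): split at each '|' whose
-- preceding character of the subject string is not '\', at most k = 7 splits
-- (exact regex semantics for this pattern: the lookbehind inspects the subject string).
def splitB : List Char → Option Char → Nat → List Char → List (List Char)
  | [], _, _, acc => [acc]
  | c :: rest, prev, k, acc =>
      if c = '|' ∧ prev ≠ some '\\' ∧ 0 < k then acc :: splitB rest (some c) (k - 1) []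
      else splitB rest (some c) k (acc ++ [c])

-- Port of p.replace('\\|', '|'): left-to-right non-overlapping replacement,
-- exact for this two-character pattern.
def unesc : List Char → List Char
  | '\\' :: '|' :: rest => '|' :: unesc rest
  | c :: rest => c :: unesc rest
  | [] => []

def safe_split_header_py_alt (text : String) : List String :=
  let parts := splitB text.toList none 7 []
  if parts.length = 8 then
    (parts.take 7).map (fun p => String.mk (unesc p)) ++ (parts.drop 7).map String.mk
  else
    parts.map (fun p => String.mk (unesc p))

-- ===== PRECONDITION & SPEC =====
def Spec_safe_split_header_py (text : String) (out : List String) : Prop := out = safe_split_header_py_alt text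
instance (text : String) (out : List String) : Decidable (Spec_safe_split_header_py text out) := by unfold Spec_safe_split_header_py; infer_instance

-- ===== CLAIM (what is proved, stated in full; the proofs are below) =====
def Claim_equal_safe_split_header_py : Prop := ∀ (text : String), Dom_safe_split_header_py text → Spec_safe_split_header_py text (safe_split_header_py text)

-- ===== LEMMAS AND PROOFS =====

-- B's post-pass at the List-Char level, parametrised by the remaining split budget.
def fin (parts : List (List Char)) (k : Nat) : List (List Char) :=
  if parts.length = k + 1 then (parts.take k).map unesc ++ parts.drop k
  else parts.map unesc

theorem unesc_cons_ne (c : Char) (rest : List Char)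
    (h : ¬(c = '\\' ∧ rest.head? = some '|')) : unesc (c :: rest) = c :: unesc rest := by
  by_cases h1 : c = '\\'
  · cases rest with
    | nil => simp [unesc]
    | cons d tl =>
        have h2 : d ≠ '|' := fun h2 => h ⟨h1, by simp [h2]⟩
        simp [unesc, h1, h2]
  · cases rest with
    | nil => simp [unesc]
    | cons d tl => simp [unesc, h1]

theorem unesc_append_pair (xs : List Char) :
    unesc (xs ++ ['\\', '|']) = unesc xs ++ ['|'] := by
  fun_induction unesc xs with
  | case1 rest ih => simp [unesc, ih]
  | case2 c rest h ih =>
      have hg : ¬(c = '\\' ∧ rest.head? = some '|') := by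
        rintro ⟨h1, h2⟩
        cases rest with
        | nil => simp at h2
        | cons d tl => exact h tl h1 (by simp_all)
      have hg' : ¬(c = '\\' ∧ (rest ++ ['\\', '|']).head? = some '|') := by
        rintro ⟨h1, h2⟩
        cases rest with
        | nil => simp at h2
        | cons d tl => exact hg ⟨h1, by simpa using h2⟩
      simp [List.cons_append, unesc_cons_ne c _ hg', ih]
  | case3 => simp [unesc]

theorem unesc_append_single (xs : List Char) (c : Char) (hc : c ≠ '|') :
    unesc (xs ++ [c]) = unesc xs ++ [c] := by
  fun_induction unesc xs with
  | case1 rest ih => simp [unesc, ih]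
  | case2 a rest h ih =>
      have hg : ¬(a = '\\' ∧ rest.head? = some '|') := by
        rintro ⟨h1, h2⟩
        cases rest with
        | nil => simp at h2
        | cons d tl => exact h tl h1 (by simp_all)
      have hg' : ¬(a = '\\' ∧ (rest ++ [c]).head? = some '|') := by
        rintro ⟨h1, h2⟩
        cases rest with
        | nil => exact hc (by simpa using h2)
        | cons d tl => exact hg ⟨h1, by simpa using h2⟩
      simp [List.cons_append, unesc_cons_ne a _ hg', ih]
  | case3 => simp [unesc]

theorem splitB_zero (cs : List Char) : ∀ prev acc, splitB cs prev 0 acc = [acc ++ cs] := by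
  induction cs with
  | nil => intro prev acc; simp [splitB]
  | cons c rest ih => intro prev acc; simp [splitB, ih]

theorem fin_cons (a : List Char) (P : List (List Char)) (k : Nat) (hk : 1 ≤ k) :
    fin (a :: P) k = unesc a :: fin P (k - 1) := by
  obtain ⟨k', rfl⟩ : ∃ k', k = k' + 1 := ⟨k - 1, by omega⟩
  unfold fin
  by_cases h : P.length = k' + 1 <;> simp [h]

theorem loopA_eq_fin (cs current : List Char) (result : List (List Char)) (pc : Nat) :
    pc ≤ 6 → ∀ (prev : Option Char) (acc : List Char), unesc acc = current →
      (cs.head? = some '|' → prev ≠ some '\\') →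
      loopA cs current result pc = result ++ fin (splitB cs prev (7 - pc) acc) (7 - pc) := by
  induction cs, current, result, pc using loopA.induct with
  | case1 current result pc hlt =>
      intro hpc prev acc hacc hhd
      simp [loopA, splitB, fin, hlt, hacc]
      intro h
      exact absurd h (by omega)
  | case2 current result pc hge =>
      intro hpc prev acc hacc hhd
      omega
  | case3 c rest current result pc hesc ih =>
      intro hpc prev acc hacc hhd
      obtain ⟨h1, h2⟩ := hesc
      obtain ⟨d, tl, rfl⟩ : ∃ d tl, rest = d :: tl := by
        cases rest with
        | nil => simp at h2
        | cons d tl => exact ⟨d, tl, rfl⟩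
      have hd : d = '|' := by simpa using h2
      subst hd h1
      simp only [loopA, List.tail_cons]
      have hs : splitB ('\\' :: '|' :: tl) prev (7 - pc) acc
          = splitB tl (some '|') (7 - pc) (acc ++ ['\\', '|']) := by
        simp [splitB, List.append_assoc]
      rw [hs]
      exact ih hpc (some '|') (acc ++ ['\\', '|'])
        (by rw [unesc_append_pair, hacc]) (by simp)
  | case4 rest current result pc hstop hne =>
      intro hpc prev acc hacc hhd
      have hprev : prev ≠ some '\\' := hhd rfl
      simp only [loopA, if_neg hne, if_pos hstop]
      have hpc6 : pc = 6 := by omega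
      subst hpc6
      have hs : splitB ('|' :: rest) prev 1 acc = [acc, rest] := by
        simp [splitB, hprev, splitB_zero]
      rw [show (7 : Nat) - 6 = 1 from rfl, hs]
      simp [fin, hacc]
  | case5 rest current result pc hstop hne ih =>
      intro hpc prev acc hacc hhd
      have hprev : prev ≠ some '\\' := hhd rfl
      simp only [loopA, if_neg hne, if_neg hstop]
      have hk : 0 < 7 - pc := by omega
      have hs : splitB ('|' :: rest) prev (7 - pc) acc
          = acc :: splitB rest (some '|') (7 - pc - 1) [] := by
        simp [splitB, hprev, hk]
      rw [hs, fin_cons _ _ _ (by omega), hacc,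
        ih (by omega) (some '|') [] rfl (by simp),
        show 7 - (pc + 1) = 7 - pc - 1 by omega]
      simp
  | case6 c rest current result pc hesc hcp ih =>
      intro hpc prev acc hacc hhd
      simp only [loopA, if_neg hesc, if_neg hcp]
      have hs : splitB (c :: rest) prev (7 - pc) acc
          = splitB rest (some c) (7 - pc) (acc ++ [c]) := by
        simp [splitB, hcp]
      rw [hs]
      refine ih hpc (some c) (acc ++ [c]) (by rw [unesc_append_single _ _ hcp, hacc]) ?_
      intro hr
      cases rest with
      | nil => simp at hr
      | cons d tl =>
          have hd : d = '|' := by simpa using hr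
          intro hcon
          injection hcon with hcon
          exact hesc ⟨hcon, by simp [hd]⟩

theorem fin_map_mk (parts : List (List Char)) :
    (fin parts 7).map String.mk
      = if parts.length = 8 then
          (parts.take 7).map (fun p => String.mk (unesc p)) ++ (parts.drop 7).map String.mk
        else parts.map (fun p => String.mk (unesc p)) := by
  unfold fin
  by_cases h : parts.length = 8 <;> simp [h, Function.comp_def]

-- ===== VERDICT (by name: the statement is the Claim_ definition above) =====
theorem safe_split_header_py_spec : Claim_equal_safe_split_header_py := by
  intro text _
  unfold Spec_safe_split_header_py safe_split_header_py safe_split_header_py_alt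
  rw [loopA_eq_fin text.toList [] [] 0 (by omega) none [] rfl (by simp)]
  simpa using fin_map_mk (splitB text.toList none 7 [])
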